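-- pv_equiv track=rewrite | github.com/SebinYu-hub/PS2 | solution/76.py | solution
-- ===== SOURCE A (Python) =====
-- def solution(land):
--     # 최적화 1: 첫 번째 행을 복사하여 DP 배열 초기화
--     # @reference/list_comprehension.py 참조
--     dp = land[0][:]
--
--     # 최적화 2: 각 행에 대해 최대값 계산
--     for i in range(1, len(land)):
--         # 최적화 3: 현재 행의 값을 임시 저장
--         curr = [0] * 4
--
--         # 최적화 4: 각 열에 대해 이전 행의 다른 열 중 최대값 선택
--         for j in range(4):
--             # 최적화 5: 리스트 슬라이싱으로 현재 열 제외한 최대값 계산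
--             prev_max = max(dp[:j] + dp[j+1:])
--             curr[j] = land[i][j] + prev_max
--
--         dp = curr  # 다음 행 계산을 위해 현재 값 저장
--
--     return max(dp)  # 마지막 행에서의 최대값 반환
-- ===== SOURCE B (Python) =====
-- def solution(land):
--     dp = land[0][:]
--     for i in range(1, len(land)):
--         m1 = max(dp)
--         idx = dp.index(m1)
--         m2 = max(dp[:idx] + dp[idx + 1:])
--         dp = [land[i][j] + (m2 if j == idx else m1) for j in range(4)]
--     return max(dp)
-- ===== Notes on version B (the rewrite author's own statement) =====
-- stated objective: simpler
-- what changed: Instead of rescanning the previous DP row with slicing to get the max excluding each column (4 excluded-max scans per row), B computes once per row the max m1, its first index, and the max m2 of the row with that index removed, then picks m2 or m1 per column.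
import Mathlib
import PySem

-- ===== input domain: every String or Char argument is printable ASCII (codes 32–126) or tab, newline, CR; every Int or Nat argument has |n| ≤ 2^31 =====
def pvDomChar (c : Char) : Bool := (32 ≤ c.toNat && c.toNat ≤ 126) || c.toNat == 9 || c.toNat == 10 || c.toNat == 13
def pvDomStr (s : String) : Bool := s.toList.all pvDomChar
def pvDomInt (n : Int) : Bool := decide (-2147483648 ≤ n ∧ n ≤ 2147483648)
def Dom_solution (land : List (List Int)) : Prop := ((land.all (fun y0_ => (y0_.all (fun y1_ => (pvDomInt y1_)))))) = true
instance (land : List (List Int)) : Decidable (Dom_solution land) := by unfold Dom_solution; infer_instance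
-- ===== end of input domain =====

-- B replaces A's per-column rescan of the previous row (max of the row with that column sliced out,
-- 4 scans per row) by the top-two values of the previous row computed once per row (2 scans); same results.

-- ===== PORT A =====
-- inner loop of A: curr[j] = land[i][j] + max(dp[:j] + dp[j+1:]) for j in range(4)
def solAStep (dp row : List Int) : List Int :=
  (PySem.List.pyRange 0 4 1).map (fun j =>
    (PySem.List.pyGet? row j).getD 0 +
      (PySem.List.max? (PySem.List.slice dp none (some j) ++ PySem.List.slice dp (some (j + 1)) none)
        (fun y => y)).getD 0)

def solution (land : List (List Int)) : Int :=
  match land with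
  | [] => 0  -- unreachable: Pre_solution excludes [] (Python raises IndexError on land[0])
  | r0 :: rest =>
    (PySem.List.max? (rest.foldl solAStep r0) (fun y => y)).getD 0

-- ===== PORT B =====
-- inner step of B: m1 = max(dp), idx = dp.index(m1), m2 = max(dp with position idx removed)
def solBStep (dp row : List Int) : List Int :=
  let m1 := (PySem.List.max? dp (fun y => y)).getD 0
  let idx : Nat := (PySem.List.index? dp m1).getD 0
  let m2 := (PySem.List.max? (PySem.List.slice dp none (some (idx : Int)) ++
      PySem.List.slice dp (some ((idx : Int) + 1)) none) (fun y => y)).getD 0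
  (PySem.List.pyRange 0 4 1).map (fun j =>
    (PySem.List.pyGet? row j).getD 0 + (if j = (idx : Int) then m2 else m1))

def solution_alt (land : List (List Int)) : Int :=
  match land with
  | [] => 0  -- unreachable: Pre_solution excludes [] (Python raises IndexError on land[0])
  | r0 :: rest =>
    (PySem.List.max? (rest.foldl solBStep r0) (fun y => y)).getD 0

-- ===== PRECONDITION & SPEC =====
-- Pre_ = exactly where the Python A returns: land nonempty; a lone first row nonempty (max of it);
-- with further rows, first row length ≥ 2 (slicing out a column must leave something) and later rows length ≥ 4.
def Pre_solution (land : List (List Int)) : Prop :=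
  land ≠ [] ∧ (land.length = 1 → land.headI ≠ []) ∧
    (2 ≤ land.length → 2 ≤ land.headI.length ∧ ∀ row ∈ land.tail, 4 ≤ row.length)
instance (land : List (List Int)) : Decidable (Pre_solution land) := by unfold Pre_solution; infer_instance

def pvWitness_solution : List (List Int) := [[1, 2, 3, 4], [5, 6, 7, 8]]

def Spec_solution (land : List (List Int)) (out : Int) : Prop := out = solution_alt land
instance (land : List (List Int)) (out : Int) : Decidable (Spec_solution land out) := by unfold Spec_solution; infer_instance

-- ===== CLAIM (what is proved, stated in full; the proofs are below) =====
def Claim_equal_solution : Prop := ∀ (land : List (List Int)), Dom_solution land → Pre_solution land → Spec_solution land (solution land)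

-- ===== LEMMAS AND PROOFS =====

-- the value of max(xs) is the unique upper bound belonging to xs
lemma maxGetD_eq (xs : List Int) (m : Int) (hm : m ∈ xs) (hub : ∀ y ∈ xs, y ≤ m) :
    (PySem.List.max? xs (fun y => y)).getD 0 = m := by
  cases h : PySem.List.max? xs (fun y => y) with
  | none => exact absurd ((PySem.List.max?_eq_none_iff _ _).mp h ▸ hm) (List.not_mem_nil)
  | some v =>
    have h1 := PySem.List.max?_mem h
    have h2 := PySem.List.max?_isMax h m hm
    simpa using le_antisymm (hub v h1) h2

lemma max_spec (xs : List Int) (hne : xs ≠ []) :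
    (PySem.List.max? xs (fun y => y)).getD 0 ∈ xs ∧
      ∀ y ∈ xs, y ≤ (PySem.List.max? xs (fun y => y)).getD 0 := by
  cases h : PySem.List.max? xs (fun y => y) with
  | none => exact absurd ((PySem.List.max?_eq_none_iff _ _).mp h) hne
  | some v =>
    refine ⟨by simpa using PySem.List.max?_mem h, fun y hy => by simpa using PySem.List.max?_isMax h y hy⟩

-- A's per-column excluded max equals B's top-two selection, for every nonnegative column index j
lemma inner_eq (dp : List Int) (h2 : 2 ≤ dp.length) (j : Int) (hj : 0 ≤ j) :
    (PySem.List.max? (PySem.List.slice dp none (some j) ++ PySem.List.slice dp (some (j + 1)) none)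
        (fun y => y)).getD 0 =
      (if j = (((PySem.List.index? dp ((PySem.List.max? dp (fun y => y)).getD 0)).getD 0 : Nat) : Int) then
        (PySem.List.max? (PySem.List.slice dp none
            (some (((PySem.List.index? dp ((PySem.List.max? dp (fun y => y)).getD 0)).getD 0 : Nat) : Int)) ++
          PySem.List.slice dp
            (some ((((PySem.List.index? dp ((PySem.List.max? dp (fun y => y)).getD 0)).getD 0 : Nat) : Int) + 1)) none)
          (fun y => y)).getD 0
      else (PySem.List.max? dp (fun y => y)).getD 0) := by
  have hne : dp ≠ [] := by intro h; subst h; simp at h2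
  obtain ⟨hm, hub⟩ := max_spec dp hne
  set m1 := (PySem.List.max? dp (fun y => y)).getD 0 with hm1
  obtain ⟨k, hk⟩ : ∃ k, PySem.List.index? dp m1 = some k := by
    cases h : PySem.List.index? dp m1 with
    | none => exact absurd hm ((PySem.List.index?_eq_none_iff _ _).mp h)
    | some k => exact ⟨k, rfl⟩
  obtain ⟨hklen, hkget, _⟩ := PySem.List.getElem_of_index?_eq_some hk
  rw [hk]
  simp only [Option.getD_some]
  by_cases hjk : j = (k : Int)
  · simp [hjk]
  · rw [if_neg hjk]
    rw [PySem.List.slice_to _ hj, PySem.List.slice_from _ (by omega)]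
    have hjn : (j + 1).toNat = j.toNat + 1 := by omega
    rw [hjn]
    set jn := j.toNat with hjndef
    have hkjn : k ≠ jn := by omega
    apply maxGetD_eq
    · -- m1 = dp[k] survives the removal of position jn ≠ k
      rcases Nat.lt_or_ge k jn with hlt | hge
      · refine List.mem_append.mpr (Or.inl ?_)
        exact List.mem_iff_getElem.mpr ⟨k, by simp; omega, by
          rw [List.getElem_take]; exact hkget⟩
      · have hgt : jn + 1 ≤ k := by omega
        refine List.mem_append.mpr (Or.inr ?_)
        refine List.mem_iff_getElem.mpr ⟨k - (jn + 1), by simp; omega, ?_⟩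
        rw [List.getElem_drop]
        have he : jn + 1 + (k - (jn + 1)) = k := by omega
        simp only [he]
        exact hkget
    · intro y hy
      rcases List.mem_append.mp hy with h | h
      · exact hub y (List.mem_of_mem_take h)
      · exact hub y (List.mem_of_mem_drop h)

lemma step_eq (dp row : List Int) (h2 : 2 ≤ dp.length) : solAStep dp row = solBStep dp row := by
  unfold solAStep solBStep
  apply List.map_congr_left
  intro j hj
  have hj0 : 0 ≤ j := (PySem.List.mem_pyRange_one.mp hj).1
  rw [inner_eq dp h2 j hj0]

lemma step_len (dp row : List Int) : (solBStep dp row).length = 4 := by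
  simp [solBStep, PySem.List.length_pyRange_one]

lemma foldl_eq (rest : List (List Int)) (dp : List Int) (h2 : 2 ≤ dp.length) :
    rest.foldl solAStep dp = rest.foldl solBStep dp := by
  induction rest generalizing dp with
  | nil => rfl
  | cons r rs ih =>
    simp only [List.foldl_cons]
    rw [step_eq dp r h2]
    exact ih (solBStep dp r) (by rw [step_len]; omega)

-- ===== VERDICT (by name: the statement is the Claim_ definition above) =====
theorem solution_spec : Claim_equal_solution := by
  intro land _ hpre
  obtain ⟨hne, _, hmulti⟩ := hpre
  unfold Spec_solution
  cases land with
  | nil => exact absurd rfl hne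
  | cons r0 rest =>
    cases rest with
    | nil => rfl
    | cons r rs =>
      have h2 : 2 ≤ r0.length := (hmulti (by simp)).1
      simp only [solution, solution_alt, foldl_eq (r :: rs) r0 h2]
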